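-- pv_equiv track=rewrite | github.com/namehash/namekit | apps/api.nameai.io/nameai/nlp_inspector.py | uniq_gaps
-- ===== SOURCE A (Python) =====
-- def uniq_gaps(tokenized):
--     result = []
--     before_empty = False
--     for token in tokenized:
--         if token != '':
--             result.append(token)
--             before_empty = False
--         else:
--             if not before_empty:
--                 before_empty = True
--                 result.append('')
--     return result
-- ===== SOURCE B (Python) =====
-- def uniq_gaps(tokenized):
--     # Run-grouping: scan each maximal run of equal emptiness at once,
--     # emitting one '' for an empty run and the whole run otherwise.
--     result = []
--     i = 0
--     n = len(tokenized)
--     while i < n: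
--         is_empty = tokenized[i] == ''
--         j = i + 1
--         while j < n and (tokenized[j] == '') == is_empty:
--             j += 1
--         if is_empty:
--             result.append('')
--         else:
--             result.extend(tokenized[i:j])
--         i = j
--     return result
-- ===== Notes on version B (the rewrite author's own statement) =====
-- stated objective: alternative
-- what changed: Replaces the per-token loop with a before_empty boolean state machine by run-grouping: scan each maximal run of equal emptiness and emit a single '' for an empty run or the whole run otherwise.
import Mathlib
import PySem

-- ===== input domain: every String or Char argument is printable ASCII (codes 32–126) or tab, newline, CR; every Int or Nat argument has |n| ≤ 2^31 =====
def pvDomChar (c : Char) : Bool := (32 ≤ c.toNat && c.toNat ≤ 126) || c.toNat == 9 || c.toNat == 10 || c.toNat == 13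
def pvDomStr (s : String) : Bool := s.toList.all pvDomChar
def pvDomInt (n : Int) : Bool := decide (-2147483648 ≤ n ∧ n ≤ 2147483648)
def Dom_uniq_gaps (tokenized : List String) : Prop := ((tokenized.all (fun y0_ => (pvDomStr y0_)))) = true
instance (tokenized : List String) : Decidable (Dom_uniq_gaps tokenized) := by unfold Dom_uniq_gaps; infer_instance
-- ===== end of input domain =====

-- B replaces A's before_empty boolean state machine by run-grouping over maximal
-- runs of equal emptiness (alternative decomposition, same O(n) cost).


-- ===== PORT A =====
-- literal port: fold over tokens carrying (result, before_empty)
def stepA (s : List String × Bool) (token : String) : List String × Bool :=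
  if token ≠ "" then (s.1 ++ [token], false)
  else if s.2 = false then (s.1 ++ [""], true) else s

def uniq_gaps (tokenized : List String) : List String :=
  (tokenized.foldl stepA ([], false)).1

-- ===== PORT B =====
-- literal port of Source B: peel one maximal run of equal emptiness per step
def uniq_gaps_alt (tokenized : List String) : List String :=
  match tokenized with
  | [] => []
  | t :: ts =>
    let isEmpty := decide (t = "")
    let run := ts.takeWhile (fun x => decide (x = "") == isEmpty)
    let rest := ts.dropWhile (fun x => decide (x = "") == isEmpty)
    (if isEmpty then [""] else t :: run) ++ uniq_gaps_alt rest
termination_by tokenized.length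
decreasing_by
  exact Nat.lt_succ_of_le (ts.length_dropWhile_le _)

-- ===== PRECONDITION & SPEC =====
def Spec_uniq_gaps (tokenized : List String) (out : List String) : Prop := out = uniq_gaps_alt tokenized
instance (tokenized : List String) (out : List String) : Decidable (Spec_uniq_gaps tokenized out) := by unfold Spec_uniq_gaps; infer_instance

-- ===== CLAIM (what is proved, stated in full; the proofs are below) =====
def Claim_equal_uniq_gaps : Prop := ∀ (tokenized : List String), Dom_uniq_gaps tokenized → Spec_uniq_gaps tokenized (uniq_gaps tokenized)

-- ===== LEMMAS AND PROOFS =====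

-- A's loop, abstracted: the tail A appends from state before_empty = b
def auxA : Bool → List String → List String
  | _, [] => []
  | b, t :: ts =>
    if t = "" then (if b then auxA true ts else "" :: auxA true ts)
    else t :: auxA false ts

theorem uniq_gaps_loop (l : List String) (acc : List String) (b : Bool) :
    (l.foldl stepA (acc, b)).1 = acc ++ auxA b l := by
  induction l generalizing acc b with
  | nil => simp [auxA]
  | cons t ts ih =>
    rw [List.foldl_cons]
    by_cases h : t = ""
    · subst h
      cases b
      · have hs : stepA (acc, false) "" = (acc ++ [""], true) := by simp [stepA]
        rw [hs, ih]; simp [auxA]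
      · have hs : stepA (acc, true) "" = (acc, true) := by simp [stepA]
        rw [hs, ih]; simp [auxA]
    · have hs : stepA (acc, b) t = (acc ++ [t], false) := by simp [stepA, h]
      rw [hs, ih]; simp [auxA, h]

theorem auxA_true (l : List String) :
    auxA true l = auxA false (l.dropWhile (fun x => decide (x = ""))) := by
  induction l with
  | nil => rfl
  | cons t ts ih =>
    by_cases h : t = ""
    · subst h; simpa [auxA] using ih
    · simp [auxA, h]

theorem auxA_peel (l : List String) :
    auxA false l =
      l.takeWhile (fun x => decide (x = "") == false) ++
        auxA false (l.dropWhile (fun x => decide (x = "") == false)) := by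
  induction l with
  | nil => rfl
  | cons t ts ih =>
    by_cases h : t = ""
    · simp [h]
    · simp [h, auxA, ih]

theorem auxA_alt : ∀ (n : ℕ) (l : List String), l.length ≤ n →
    auxA false l = uniq_gaps_alt l := by
  intro n
  induction n with
  | zero =>
    intro l h
    have : l = [] := List.eq_nil_of_length_eq_zero (Nat.le_zero.mp h)
    subst this; simp [uniq_gaps_alt, auxA]
  | succ n ih =>
    intro l h
    match l with
    | [] => simp [uniq_gaps_alt, auxA]
    | t :: ts =>
      by_cases ht : t = ""
      · subst ht
        rw [uniq_gaps_alt.eq_def]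
        simp only [auxA, decide_true]
        rw [auxA_true]
        have hd : (ts.dropWhile (fun x => decide (x = "") == true)).length ≤ n := by
          have := ts.length_dropWhile_le (fun x => decide (x = "") == true)
          simp at h; omega
        have hpred : (fun x : String => decide (x = "")) = (fun x => decide (x = "") == true) := by
          funext x; simp
        rw [hpred, ih _ hd]
        simp
      · rw [uniq_gaps_alt]
        simp only [auxA, ht, decide_false]
        rw [auxA_peel ts]
        have hd : (ts.dropWhile (fun x => decide (x = "") == false)).length ≤ n := by
          have := ts.length_dropWhile_le (fun x => decide (x = "") == false)
          simp at h; omega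
        rw [ih _ hd]
        simp

-- ===== VERDICT (by name: the statement is the Claim_ definition above) =====
theorem uniq_gaps_spec : Claim_equal_uniq_gaps := by
  intro tokenized _
  unfold Spec_uniq_gaps uniq_gaps
  rw [uniq_gaps_loop]
  simpa using auxA_alt tokenized.length tokenized le_rfl
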